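-- pv_equiv track=rewrite | github.com/SpartanPlumbingJosh/juggernaut-autonomy | core/unified_brain.py | _infer_target_files
-- ===== SOURCE A (Python) =====
-- from typing import Any, Callable, Dict, Generator, List, Optional, Set, Tuple, Union
--
-- def _infer_target_files(task_description: str, task_title: str) -> Optional[List[str]]:
--     """Infer target files from task description when not explicitly specified.
--
--     Args:
--         task_description: Full task description
--         task_title: Task title
--
--     Returns:
--         List of likely target files, or None if can't determine
--     """
--     text = (task_description + " " + task_title).lower()
--
--     # Revenue/financial systems
--     if any(kw in text for kw in ["revenue", "financial", "payment", "billing"]):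
--         return ["api/revenue_api.py", "core/portfolio_manager.py"]
--
--     # Discovery/opportunity systems
--     if any(kw in text for kw in ["discovery", "opportunity", "scanning"]):
--         return ["core/discovery.py", "core/opportunity_scanner.py"]
--
--     # Task/goal management
--     if any(kw in text for kw in ["task", "goal", "workflow"]):
--         return ["core/autonomous_engine.py", "main.py"]
--
--     # Database/schema changes
--     if any(kw in text for kw in ["database", "schema", "migration", "table"]):
--         return ["core/database.py"]
--
--     # API/routes
--     if any(kw in text for kw in ["api", "endpoint", "route"]):
--         return ["api/revenue_api.py", "api/api_server.py"]
--
--     # Brain/AI systems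
--     if any(kw in text for kw in ["brain", "llm", "ai", "model"]):
--         return ["core/unified_brain.py", "core/ai_executor.py"]
--
--     # Learning/improvement
--     if any(kw in text for kw in ["learning", "improvement", "optimization"]):
--         return ["core/learning.py", "core/learning_capture.py"]
--
--     # Default to main autonomous engine for broad tasks
--     if any(kw in text for kw in ["autonomous", "platform", "system", "core"]):
--         return ["core/autonomous_engine.py"]
--
--     # Can't determine - let Aider fail or use AIHandler
--     return None
-- ===== SOURCE B (Python) =====
-- # B: flat keyword->priority map; one min-accumulator pass computes the highest-priority
-- # (lowest index) matched category, then a final lookup returns its file list (objective: alternative).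
--
-- _KEYWORD_PRIORITY = {
--     "revenue": 0, "financial": 0, "payment": 0, "billing": 0,
--     "discovery": 1, "opportunity": 1, "scanning": 1,
--     "task": 2, "goal": 2, "workflow": 2,
--     "database": 3, "schema": 3, "migration": 3, "table": 3,
--     "api": 4, "endpoint": 4, "route": 4,
--     "brain": 5, "llm": 5, "ai": 5, "model": 5,
--     "learning": 6, "improvement": 6, "optimization": 6,
--     "autonomous": 7, "platform": 7, "system": 7, "core": 7,
-- }
--
-- _FILES = [
--     ["api/revenue_api.py", "core/portfolio_manager.py"],
--     ["core/discovery.py", "core/opportunity_scanner.py"],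
--     ["core/autonomous_engine.py", "main.py"],
--     ["core/database.py"],
--     ["api/revenue_api.py", "api/api_server.py"],
--     ["core/unified_brain.py", "core/ai_executor.py"],
--     ["core/learning.py", "core/learning_capture.py"],
--     ["core/autonomous_engine.py"],
-- ]
--
--
-- def _infer_target_files(task_description: str, task_title: str):
--     text = (task_description + " " + task_title).lower()
--     best = None
--     for kw, prio in _KEYWORD_PRIORITY.items():
--         if kw in text and (best is None or prio < best):
--             best = prio
--     return None if best is None else _FILES[best]
-- ===== Notes on version B (the rewrite author's own statement) =====
-- stated objective: alternative
-- what changed: Instead of an eight-branch first-match-wins if-chain, B scans a flat keyword-to-priority dict once with a min accumulator (no early return) and finally indexes the matched priority into a file table.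
import Mathlib
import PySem

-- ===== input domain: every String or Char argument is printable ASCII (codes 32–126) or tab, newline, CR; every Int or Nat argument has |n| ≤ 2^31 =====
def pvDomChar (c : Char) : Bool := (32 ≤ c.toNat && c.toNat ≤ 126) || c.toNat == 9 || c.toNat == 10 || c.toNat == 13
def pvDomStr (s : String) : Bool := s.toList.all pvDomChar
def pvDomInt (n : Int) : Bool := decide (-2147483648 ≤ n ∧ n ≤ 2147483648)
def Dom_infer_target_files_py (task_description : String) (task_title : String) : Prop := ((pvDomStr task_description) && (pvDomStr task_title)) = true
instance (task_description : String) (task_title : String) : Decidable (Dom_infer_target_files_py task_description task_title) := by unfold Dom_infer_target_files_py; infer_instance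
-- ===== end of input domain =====

-- B replaces A's first-match-wins branch chain by a min-accumulator pass over a flat
-- keyword→priority map followed by a final file-table lookup (objective: alternative).

-- ===== PORT A =====
def infer_target_files_py (task_description : String) (task_title : String) : Option (List String) :=
  let text := PySem.Str.lower (task_description ++ " " ++ task_title)
  if (["revenue", "financial", "payment", "billing"] : List String).any (fun kw => PySem.Str.isIn kw text) then
    some ["api/revenue_api.py", "core/portfolio_manager.py"]
  else if (["discovery", "opportunity", "scanning"] : List String).any (fun kw => PySem.Str.isIn kw text) then
    some ["core/discovery.py", "core/opportunity_scanner.py"]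
  else if (["task", "goal", "workflow"] : List String).any (fun kw => PySem.Str.isIn kw text) then
    some ["core/autonomous_engine.py", "main.py"]
  else if (["database", "schema", "migration", "table"] : List String).any (fun kw => PySem.Str.isIn kw text) then
    some ["core/database.py"]
  else if (["api", "endpoint", "route"] : List String).any (fun kw => PySem.Str.isIn kw text) then
    some ["api/revenue_api.py", "api/api_server.py"]
  else if (["brain", "llm", "ai", "model"] : List String).any (fun kw => PySem.Str.isIn kw text) then
    some ["core/unified_brain.py", "core/ai_executor.py"]
  else if (["learning", "improvement", "optimization"] : List String).any (fun kw => PySem.Str.isIn kw text) then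
    some ["core/learning.py", "core/learning_capture.py"]
  else if (["autonomous", "platform", "system", "core"] : List String).any (fun kw => PySem.Str.isIn kw text) then
    some ["core/autonomous_engine.py"]
  else
    none

-- ===== PORT B =====
-- the _KEYWORD_PRIORITY dict (iterated in insertion order)
def pvKeywordPriority : List (String × Nat) :=
  [ ("revenue", 0), ("financial", 0), ("payment", 0), ("billing", 0),
    ("discovery", 1), ("opportunity", 1), ("scanning", 1),
    ("task", 2), ("goal", 2), ("workflow", 2),
    ("database", 3), ("schema", 3), ("migration", 3), ("table", 3),
    ("api", 4), ("endpoint", 4), ("route", 4),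
    ("brain", 5), ("llm", 5), ("ai", 5), ("model", 5),
    ("learning", 6), ("improvement", 6), ("optimization", 6),
    ("autonomous", 7), ("platform", 7), ("system", 7), ("core", 7) ]

def pvFiles : List (List String) :=
  [ ["api/revenue_api.py", "core/portfolio_manager.py"],
    ["core/discovery.py", "core/opportunity_scanner.py"],
    ["core/autonomous_engine.py", "main.py"],
    ["core/database.py"],
    ["api/revenue_api.py", "api/api_server.py"],
    ["core/unified_brain.py", "core/ai_executor.py"],
    ["core/learning.py", "core/learning_capture.py"],
    ["core/autonomous_engine.py"] ]

-- one iteration of B's loop: keep the smallest priority among matched keywords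
def pvStep (text : String) (best : Option Nat) (e : String × Nat) : Option Nat :=
  if PySem.Str.isIn e.1 text && (match best with | none => true | some b => decide (e.2 < b)) then
    some e.2
  else best

def infer_target_files_py_alt (task_description : String) (task_title : String) : Option (List String) :=
  let text := PySem.Str.lower (task_description ++ " " ++ task_title)
  match pvKeywordPriority.foldl (pvStep text) none with
  | none => none
  -- _FILES[best]: pyGet? is exact; the index is always 0..7 here so it never yields none
  | some b => PySem.List.pyGet? pvFiles (Int.ofNat b)

-- ===== PRECONDITION & SPEC =====
def Spec_infer_target_files_py (task_description : String) (task_title : String) (out : Option (List String)) : Prop := out = infer_target_files_py_alt task_description task_title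
instance (task_description : String) (task_title : String) (out : Option (List String)) : Decidable (Spec_infer_target_files_py task_description task_title out) := by unfold Spec_infer_target_files_py; infer_instance

-- ===== CLAIM (what is proved, stated in full; the proofs are below) =====
def Claim_equal_infer_target_files_py : Prop := ∀ (task_description : String) (task_title : String), Dom_infer_target_files_py task_description task_title → Spec_infer_target_files_py task_description task_title (infer_target_files_py task_description task_title)

-- ===== LEMMAS AND PROOFS =====

-- once `best = some p` and every remaining priority is ≥ p, the fold never changes it
theorem pvStep_absorb (text : String) (p : Nat) (l : List (String × Nat))
    (h : ∀ e ∈ l, p ≤ e.2) :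
    l.foldl (pvStep text) (some p) = some p := by
  induction l with
  | nil => rfl
  | cons e rest ih =>
      have hp : p ≤ e.2 := h e (List.mem_cons_self ..)
      have : pvStep text (some p) e = some p := by
        simp [pvStep, Nat.not_lt.mpr hp]
      rw [List.foldl_cons, this]
      exact ih fun x hx => h x (List.mem_cons_of_mem _ hx)

-- unfold one loop step from an empty accumulator
theorem pvStep_none (text kw : String) (p : Nat) (rest : List (String × Nat)) :
    ((kw, p) :: rest).foldl (pvStep text) none =
      if PySem.Str.isIn kw text then rest.foldl (pvStep text) (some p)
      else rest.foldl (pvStep text) none := by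
  have h1 : pvStep text none (kw, p) = if PySem.Str.isIn kw text then some p else none := by
    simp only [pvStep, Bool.and_true]
  rw [List.foldl_cons, h1]
  exact apply_ite (fun init => List.foldl (pvStep text) init rest) _ _ _

-- collapse adjacent branches with the same result
theorem pv_if_or (a b : Bool) {α : Type} (x y : α) :
    (if a then x else if b then x else y) = if a || b then x else y := by
  cases a <;> cases b <;> simp

-- ===== VERDICT (by name: the statement is the Claim_ definition above) =====
theorem infer_target_files_py_spec : Claim_equal_infer_target_files_py := by
  intro td tt _
  unfold Spec_infer_target_files_py infer_target_files_py infer_target_files_py_alt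
  set text := PySem.Str.lower (td ++ " " ++ tt) with htext
  simp only [pvKeywordPriority, pvStep_none]
  rw [pvStep_absorb text 0 _ (by decide), pvStep_absorb text 0 _ (by decide),
      pvStep_absorb text 0 _ (by decide), pvStep_absorb text 0 _ (by decide),
      pvStep_absorb text 1 _ (by decide), pvStep_absorb text 1 _ (by decide),
      pvStep_absorb text 1 _ (by decide),
      pvStep_absorb text 2 _ (by decide), pvStep_absorb text 2 _ (by decide),
      pvStep_absorb text 2 _ (by decide),
      pvStep_absorb text 3 _ (by decide), pvStep_absorb text 3 _ (by decide),
      pvStep_absorb text 3 _ (by decide), pvStep_absorb text 3 _ (by decide),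
      pvStep_absorb text 4 _ (by decide), pvStep_absorb text 4 _ (by decide),
      pvStep_absorb text 4 _ (by decide),
      pvStep_absorb text 5 _ (by decide), pvStep_absorb text 5 _ (by decide),
      pvStep_absorb text 5 _ (by decide), pvStep_absorb text 5 _ (by decide),
      pvStep_absorb text 6 _ (by decide), pvStep_absorb text 6 _ (by decide),
      pvStep_absorb text 6 _ (by decide),
      pvStep_absorb text 7 _ (by decide), pvStep_absorb text 7 _ (by decide),
      pvStep_absorb text 7 _ (by decide), pvStep_absorb text 7 _ (by decide)]
  simp only [apply_ite (fun o : Option Nat => match o with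
      | none => (none : Option (List String))
      | some b => PySem.List.pyGet? pvFiles (Int.ofNat b))]
  have e0 : PySem.List.pyGet? pvFiles (Int.ofNat 0) = some ["api/revenue_api.py", "core/portfolio_manager.py"] := by decide
  have e1 : PySem.List.pyGet? pvFiles (Int.ofNat 1) = some ["core/discovery.py", "core/opportunity_scanner.py"] := by decide
  have e2 : PySem.List.pyGet? pvFiles (Int.ofNat 2) = some ["core/autonomous_engine.py", "main.py"] := by decide
  have e3 : PySem.List.pyGet? pvFiles (Int.ofNat 3) = some ["core/database.py"] := by decide
  have e4 : PySem.List.pyGet? pvFiles (Int.ofNat 4) = some ["api/revenue_api.py", "api/api_server.py"] := by decide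
  have e5 : PySem.List.pyGet? pvFiles (Int.ofNat 5) = some ["core/unified_brain.py", "core/ai_executor.py"] := by decide
  have e6 : PySem.List.pyGet? pvFiles (Int.ofNat 6) = some ["core/learning.py", "core/learning_capture.py"] := by decide
  have e7 : PySem.List.pyGet? pvFiles (Int.ofNat 7) = some ["core/autonomous_engine.py"] := by decide
  simp only [e0, e1, e2, e3, e4, e5, e6, e7, List.any_cons, List.any_nil, Bool.or_false, pv_if_or, List.foldl_nil]
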